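-- pv_equiv track=rewrite | github.com/NaolGB/Sourcream | helpers.py | process_strings
-- ===== SOURCE A (Python) =====
-- def process_strings(strings):
--     """given lines of strings, cleans up and returns a set of non-whitespaced string"""
--     stripped_strings = [s.strip() for s in strings]
--
--     # Use a list to maintain the order and remove duplicates
--     unique_strings = []
--
--     for s in stripped_strings:
--         if s not in unique_strings:
--             unique_strings.append(s)
--
--     # Sort the list of unique strings
--     sorted_unique_strings = sorted(unique_strings)
--     sorted_strings_with_new_line = ""
--     for i in sorted_unique_strings:
--         sorted_strings_with_new_line += f"{i}\n"
--
--     return sorted_strings_with_new_line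
-- ===== SOURCE B (Python) =====
-- def process_strings(strings):
--     """given lines of strings, cleans up and returns a set of non-whitespaced string"""
--     ordered = sorted(s.strip() for s in strings)
--     parts = []
--     prev = None
--     for s in ordered:
--         if prev is None or s != prev:
--             parts.append(s + "\n")
--             prev = s
--     return "".join(parts)
-- ===== Notes on version B (the rewrite author's own statement) =====
-- stated objective: faster
-- what changed: Replaces the O(n^2) list-membership dedup-then-sort with sort-first followed by a single linear pass that emits each element only when it differs from the previously emitted one, collecting pieces in a list joined once instead of repeated string concatenation.
import Mathlib
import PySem

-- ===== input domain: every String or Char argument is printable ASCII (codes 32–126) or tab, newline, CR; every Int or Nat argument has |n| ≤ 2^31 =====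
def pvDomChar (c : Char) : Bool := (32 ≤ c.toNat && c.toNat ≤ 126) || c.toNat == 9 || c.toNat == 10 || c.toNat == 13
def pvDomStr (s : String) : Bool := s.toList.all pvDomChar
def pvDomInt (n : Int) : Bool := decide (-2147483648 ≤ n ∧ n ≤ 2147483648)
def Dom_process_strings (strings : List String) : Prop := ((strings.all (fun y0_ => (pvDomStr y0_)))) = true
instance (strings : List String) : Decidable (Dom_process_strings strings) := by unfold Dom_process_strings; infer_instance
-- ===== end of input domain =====

-- B sorts the stripped lines first and removes duplicates in one adjacency pass (compare to the
-- previously emitted value), joining the pieces once — faster than A's quadratic membership dedup.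

-- ===== PORT A =====
def process_strings (strings : List String) : String :=
  List.foldl (fun acc i => acc ++ (i ++ "\n")) ""
    (PySem.List.sorted
      ((strings.map (fun s => PySem.Str.strip s)).foldl
        (fun acc s => if s ∈ acc then acc else acc ++ [s]) [])
      (fun x => x) false)

-- ===== PORT B =====
-- one step of B's loop body: emit s when there is no prev yet or s differs from prev
def pvStepB (p : Option String × List String) (s : String) : Option String × List String :=
  match p.1 with
  | none => (some s, p.2 ++ [s ++ "\n"])
  | some prev => if s ≠ prev then (some s, p.2 ++ [s ++ "\n"]) else p

def process_strings_alt (strings : List String) : String :=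
  String.join
    ((List.foldl pvStepB (none, [])
      (PySem.List.sorted (strings.map (fun s => PySem.Str.strip s)) (fun x => x) false)).2)

-- ===== PRECONDITION & SPEC =====
def Spec_process_strings (strings : List String) (out : String) : Prop := out = process_strings_alt strings
instance (strings : List String) (out : String) : Decidable (Spec_process_strings strings out) := by unfold Spec_process_strings; infer_instance

-- ===== CLAIM (what is proved, stated in full; the proofs are below) =====
def Claim_equal_process_strings : Prop := ∀ (strings : List String), Dom_process_strings strings → Spec_process_strings strings (process_strings strings)

-- ===== LEMMAS AND PROOFS =====

-- A's dedup loop: result is nodup and holds exactly the elements of acc and l.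
theorem pvUniq_spec (l : List String) : ∀ (acc : List String), acc.Nodup →
    (l.foldl (fun acc s => if s ∈ acc then acc else acc ++ [s]) acc).Nodup ∧
    ∀ x, x ∈ l.foldl (fun acc s => if s ∈ acc then acc else acc ++ [s]) acc ↔ x ∈ acc ∨ x ∈ l := by
  induction l with
  | nil => intro acc h; simpa using h
  | cons b t ih =>
    intro acc h
    by_cases hb : b ∈ acc
    · have := ih acc h
      simp only [List.foldl_cons, if_pos hb]
      refine ⟨this.1, fun x => ?_⟩
      rw [this.2 x]
      simp only [List.mem_cons]
      constructor
      · rintro (h' | h') <;> tauto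
      · rintro (h' | h' | h')
        · exact Or.inl h'
        · exact Or.inl (by rw [h']; exact hb)
        · exact Or.inr h'
    · have hacc : (acc ++ [b]).Nodup :=
        h.append (List.nodup_singleton b) (by simpa [List.disjoint_singleton] using hb)
      have := ih (acc ++ [b]) hacc
      simp only [List.foldl_cons, if_neg hb]
      refine ⟨this.1, fun x => ?_⟩
      rw [this.2 x]
      simp only [List.mem_append, List.mem_cons]
      tauto

-- the adjacency pass of B at the list level: (emitted elements, last emitted)
def pvAdj (prev : String) : List String → List String × String
  | [] => ([], prev)
  | b :: t => if b ≠ prev then ((pvAdj b t).1.cons b, (pvAdj b t).2) else pvAdj prev t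

-- B's fold, characterised by pvAdj
theorem pvFoldB_spec (l : List String) : ∀ (prev : String) (out : List String),
    l.foldl pvStepB (some prev, out)
    = (some (pvAdj prev l).2, out ++ ((pvAdj prev l).1.map (fun s => s ++ "\n"))) := by
  induction l with
  | nil => intro prev out; simp [pvAdj]
  | cons b t ih =>
    intro prev out
    simp only [List.foldl_cons]
    by_cases hb : b = prev
    · rw [show pvStepB (some prev, out) b = (some prev, out) by simp [pvStepB, hb]]
      rw [ih prev out]
      simp [pvAdj, hb]
    · rw [show pvStepB (some prev, out) b = (some b, out ++ [b ++ "\n"]) by simp [pvStepB, hb]]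
      rw [ih b (out ++ [b ++ "\n"])]
      simp [pvAdj, hb]

-- on a ≤-sorted list the adjacency pass yields a strictly increasing list with the same elements
theorem pvAdj_sorted (t : List String) : ∀ (prev : String), (prev :: t).Pairwise (· ≤ ·) →
    (prev :: (pvAdj prev t).1).Pairwise (· < ·) ∧
    ∀ x, x ∈ prev :: (pvAdj prev t).1 ↔ x ∈ prev :: t := by
  induction t with
  | nil => intro prev _; simp [pvAdj]
  | cons b t ih =>
    intro prev hp
    have hpt : (prev :: t).Pairwise (· ≤ ·) := by
      rcases List.pairwise_cons.mp hp with ⟨h1, h2⟩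
      exact List.pairwise_cons.mpr ⟨fun y hy => h1 y (List.mem_cons_of_mem _ hy),
        (List.pairwise_cons.mp h2).2⟩
    have hbt : (b :: t).Pairwise (· ≤ ·) := (List.pairwise_cons.mp hp).2
    by_cases hb : b = prev
    · have := ih prev hpt
      refine ⟨by simpa [pvAdj, hb] using this.1, fun x => ?_⟩
      rw [show (pvAdj prev (b :: t)) = pvAdj prev t by simp [pvAdj, hb]]
      rw [this.2 x, hb]
      simp only [List.mem_cons]
      tauto
    · have hle : prev ≤ b := (List.pairwise_cons.mp hp).1 b (by simp)
      have hlt : prev < b := lt_of_le_of_ne hle (fun h => hb h.symm)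
      have := ih b hbt
      have hrw : pvAdj prev (b :: t) = ((pvAdj b t).1.cons b, (pvAdj b t).2) := by
        simp [pvAdj, hb]
      refine ⟨?_, fun x => ?_⟩
      · rw [hrw]
        refine List.pairwise_cons.mpr ⟨fun y hy => ?_, this.1⟩
        rcases List.mem_cons.mp hy with h | h
        · exact h ▸ hlt
        · exact hlt.trans ((List.pairwise_cons.mp this.1).1 y h)
      · rw [hrw]
        have h2 := this.2 x
        simp only [List.mem_cons] at *
        tauto

-- main equivalence over the shared stripped list
theorem pvMain (stripped : List String) :
    List.foldl (fun acc i => acc ++ (i ++ "\n")) ""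
      (PySem.List.sorted
        (stripped.foldl (fun acc s => if s ∈ acc then acc else acc ++ [s]) [])
        (fun x => x) false)
    = String.join
        ((List.foldl pvStepB (none, [])
          (PySem.List.sorted stripped (fun x => x) false)).2) := by
  have huniq := pvUniq_spec stripped [] (by simp)
  rcases hS : PySem.List.sorted stripped (fun x => x) false with _ | ⟨h, t⟩
  · have h0 : stripped = [] := (PySem.List.sorted_eq_nil_iff stripped _ false).mp hS
    subst h0
    rfl
  · have hpair : (h :: t).Pairwise (· ≤ ·) := by
      have := PySem.List.sorted_pairwise (xs := stripped) (key := fun x => x)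
      rw [hS] at this; exact this
    obtain ⟨hlt, hmem⟩ := pvAdj_sorted t h hpair
    simp only [List.foldl_cons]
    rw [show pvStepB ((none : Option String), ([] : List String)) h
        = (some h, [h ++ "\n"]) from rfl]
    rw [pvFoldB_spec t h [h ++ "\n"]]
    have hysnd : (h :: (pvAdj h t).1).Nodup :=
      hlt.imp (fun {a b} hab => ne_of_lt hab)
    have hperm : (h :: (pvAdj h t).1).Perm
        (stripped.foldl (fun acc s => if s ∈ acc then acc else acc ++ [s]) []) := by
      rw [List.perm_ext_iff_of_nodup hysnd huniq.1]
      intro x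
      rw [hmem x, ← hS, PySem.List.mem_sorted, huniq.2 x]
      simp
    have hsu : PySem.List.sorted
        (stripped.foldl (fun acc s => if s ∈ acc then acc else acc ++ [s]) [])
        (fun x => x) false = h :: (pvAdj h t).1 :=
      PySem.List.sorted_eq_of_perm_of_pairwise_lt _ _ _ hperm hlt
    rw [hsu]
    simp [String.join, List.foldl_map]

-- ===== VERDICT (by name: the statement is the Claim_ definition above) =====
theorem process_strings_spec : Claim_equal_process_strings := by
  intro strings _
  unfold Spec_process_strings process_strings process_strings_alt
  exact pvMain (strings.map (fun s => PySem.Str.strip s))
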